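-- pv_equiv track=rewrite | github.com/NatnaelAbWe/dsa-practice | Rearrange-array-such-that-even-positioned-are-greater-than-odd/practice.py | rearrangeArr
-- ===== SOURCE A (Python) =====
-- def rearrangeArr(arr):
--     # sort the array to order
--     arr.sort()
--
--     n = len(arr)
--     res = [0] * n
--     pt1, pt2 = 0, n-1
--
--     for i in range(n):
--         if (i + 1) % 2 == 0:
--             res[i] = arr[pt2]
--             pt2 -= 1
--         else:
--             res[i] = arr[pt1]
--             pt1 += 1
--     return res
-- ===== SOURCE B (Python) =====
-- def rearrangeArr(arr):
--     arr.sort()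
--     n = len(arr)
--     k = (n + 1) // 2
--     res = [0] * n
--     res[::2] = arr[:k]
--     res[1::2] = arr[k:][::-1]
--     return res
-- ===== Notes on version B (the rewrite author's own statement) =====
-- stated objective: idiomatic
-- what changed: Replaces the single interleaved two-pointer loop with two bulk strided slice assignments: even positions get the lower half of the sorted array, odd positions get the reversed upper half.
import Mathlib
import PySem

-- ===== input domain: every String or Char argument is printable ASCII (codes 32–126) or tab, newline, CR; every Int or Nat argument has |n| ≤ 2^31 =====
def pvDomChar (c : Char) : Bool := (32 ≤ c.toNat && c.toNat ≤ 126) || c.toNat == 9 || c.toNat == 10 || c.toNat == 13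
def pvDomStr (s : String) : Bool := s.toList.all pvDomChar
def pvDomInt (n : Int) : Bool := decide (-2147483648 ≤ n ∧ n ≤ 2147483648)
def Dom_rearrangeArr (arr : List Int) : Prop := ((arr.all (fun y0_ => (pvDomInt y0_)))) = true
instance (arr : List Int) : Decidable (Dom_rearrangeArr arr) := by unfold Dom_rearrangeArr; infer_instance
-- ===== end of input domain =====

-- B replaces A's interleaved two-pointer loop by two strided bulk fills (idiomatic slice assignment).
-- Both A and B sort the argument in place in Python; the equivalence proved here is about the return value.

-- ===== PORT A =====
-- Loop state: (res, pt1, pt2). pt1/pt2 are Nat: every access arr[pt1]/arr[pt2] the loop performs is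
-- in range (proved in the lemmas below), so getD 0 is exact; Python's pt2 = -1 when n = 0 is never read.
def rearrangeArr (arr : List Int) : List Int :=
  let s := PySem.List.sorted arr id
  let n := s.length
  (((List.range n).foldl
      (fun (st : List Int × Nat × Nat) i =>
        if (i + 1) % 2 == 0 then
          (st.1.set i (s.getD st.2.2 0), st.2.1, st.2.2 - 1)
        else
          (st.1.set i (s.getD st.2.1 0), st.2.1 + 1, st.2.2))
      (List.replicate n 0, 0, n - 1))).1

-- ===== PORT B =====
-- res[start::2] = items  (every assigned index is in range on B's inputs, so List.set is exact)
def setStride (res : List Int) (start : Nat) (items : List Int) : List Int :=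
  (items.foldl (fun (st : List Int × Nat) x => (st.1.set st.2 x, st.2 + 2)) (res, start)).1

def rearrangeArr_alt (arr : List Int) : List Int :=
  let s := PySem.List.sorted arr id
  let n := s.length
  let k := (n + 1) / 2
  let res := List.replicate n (0 : Int)
  let res := setStride res 0 (s.take k)
  let res := setStride res 1 ((s.drop k).reverse)
  res

-- ===== PRECONDITION & SPEC =====
def Spec_rearrangeArr (arr : List Int) (out : List Int) : Prop := out = rearrangeArr_alt arr
instance (arr : List Int) (out : List Int) : Decidable (Spec_rearrangeArr arr out) := by unfold Spec_rearrangeArr; infer_instance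

-- ===== CLAIM (what is proved, stated in full; the proofs are below) =====
def Claim_equal_rearrangeArr : Prop := ∀ (arr : List Int), Dom_rearrangeArr arr → Spec_rearrangeArr arr (rearrangeArr arr)

-- ===== LEMMAS AND PROOFS =====

-- the common target value at index i, over the sorted list s of length n
def pvTarget (s : List Int) (i : Nat) : Int :=
  if i % 2 = 0 then s.getD (i / 2) 0 else s.getD (s.length - 1 - i / 2) 0

-- A's loop invariant
theorem aLoop_invariant (s : List Int) (m : Nat) (hm : m ≤ s.length) :
    (((List.range m).foldl
        (fun (st : List Int × Nat × Nat) i =>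
          if (i + 1) % 2 == 0 then
            (st.1.set i (s.getD st.2.2 0), st.2.1, st.2.2 - 1)
          else
            (st.1.set i (s.getD st.2.1 0), st.2.1 + 1, st.2.2))
        (List.replicate s.length 0, 0, s.length - 1))) =
      (((List.range s.length).map (fun i => if i < m then pvTarget s i else 0)),
        (m + 1) / 2, s.length - 1 - m / 2) := by
  induction m with
  | zero => simp
  | succ m ih =>
      rw [List.range_succ, List.foldl_append, ih (by omega)]
      simp only [List.foldl_cons, List.foldl_nil]
      rcases Nat.even_or_odd m with he | ho
      · obtain ⟨t, ht⟩ := he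
        have h1 : ((m + 1) % 2 == 0) = false := by
          simp only [beq_eq_false_iff_ne, ne_eq]; omega
        rw [h1]
        simp only [Bool.false_eq_true, if_neg (by simp : ¬ False)]
        refine Prod.ext ?_ (Prod.ext ?_ ?_)
        · show (List.map _ (List.range s.length)).set m (s.getD ((m+1)/2) 0) = _
          have hval : (m + 1) / 2 = m / 2 := by omega
          apply List.ext_getElem (by simp)
          intro i hi1 hi2
          simp only [List.getElem_set, List.getElem_map, List.getElem_range]
          by_cases hmi : m = i
          · subst hmi
            rw [if_pos rfl, if_pos (Nat.lt_succ_self m)]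
            unfold pvTarget
            rw [if_pos (by omega : m % 2 = 0), hval]
          · simp only [if_neg hmi]
            by_cases h2 : i < m
            · simp [h2, Nat.lt_succ_of_lt h2]
            · have : ¬ i < m + 1 := by omega
              simp [h2, this]
        · show (m + 1) / 2 + 1 = (m + 1 + 1) / 2; omega
        · show s.length - 1 - m / 2 = s.length - 1 - (m + 1) / 2; omega
      · obtain ⟨t, ht⟩ := ho
        have h1 : ((m + 1) % 2 == 0) = true := by
          simp only [beq_iff_eq]; omega
        rw [h1]
        simp only [if_pos trivial]
        refine Prod.ext ?_ (Prod.ext ?_ ?_)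
        · show (List.map _ (List.range s.length)).set m (s.getD (s.length - 1 - m / 2) 0) = _
          apply List.ext_getElem (by simp)
          intro i hi1 hi2
          simp only [List.getElem_set, List.getElem_map, List.getElem_range]
          by_cases hmi : m = i
          · subst hmi
            rw [if_pos rfl, if_pos (Nat.lt_succ_self m)]
            unfold pvTarget
            rw [if_neg (by omega : ¬ m % 2 = 0)]
          · simp only [if_neg hmi]
            by_cases h2 : i < m
            · simp [h2, Nat.lt_succ_of_lt h2]
            · have : ¬ i < m + 1 := by omega
              simp [h2, this]
        · show (m + 1) / 2 = (m + 1 + 1) / 2; omega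
        · show s.length - 1 - m / 2 - 1 = s.length - 1 - (m + 1) / 2; omega

theorem rearrangeArr_eq_map (s : List Int) :
    (((List.range s.length).foldl
        (fun (st : List Int × Nat × Nat) i =>
          if (i + 1) % 2 == 0 then
            (st.1.set i (s.getD st.2.2 0), st.2.1, st.2.2 - 1)
          else
            (st.1.set i (s.getD st.2.1 0), st.2.1 + 1, st.2.2))
        (List.replicate s.length 0, 0, s.length - 1))).1 =
      (List.range s.length).map (pvTarget s) := by
  rw [aLoop_invariant s s.length le_rfl]
  simp only []
  exact List.map_congr_left (fun i hi => by simp [List.mem_range] at hi; simp [hi])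

-- setStride: length and pointwise characterisation
theorem setStride_length (items res : List Int) (start : Nat) :
    (setStride res start items).length = res.length := by
  induction items generalizing res start with
  | nil => rfl
  | cons x t ih => simpa [setStride, List.foldl_cons] using ih (res.set start x) (start + 2)

theorem setStride_getElem (items : List Int) (res : List Int) (start i : Nat)
    (hi : i < res.length) :
    (setStride res start items).getD i 0 =
      if h : i ≥ start ∧ (i - start) % 2 = 0 ∧ (i - start) / 2 < items.length then
        items.getD ((i - start) / 2) 0
      else res.getD i 0 := by
  induction items generalizing res start with
  | nil => simp [setStride]
  | cons x t ih =>
      have step : setStride res start (x :: t) = setStride (res.set start x) (start + 2) t := rfl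
      rw [step, ih (res.set start x) (start + 2) (by simpa using hi)]
      by_cases hx : i = start
      · subst hx
        have h1 : ¬ (i ≥ i + 2 ∧ (i - (i + 2)) % 2 = 0 ∧ (i - (i + 2)) / 2 < t.length) := by omega
        have h2 : i ≥ i ∧ (i - i) % 2 = 0 ∧ (i - i) / 2 < (x :: t).length := by simp
        rw [dif_neg h1, dif_pos h2]
        simp [List.getD_eq_getElem?_getD, List.getElem?_set_self (by omega : i < res.length)]
      · by_cases hc : i ≥ start + 2 ∧ (i - (start + 2)) % 2 = 0 ∧ (i - (start + 2)) / 2 < t.length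
        · have hc' : i ≥ start ∧ (i - start) % 2 = 0 ∧ (i - start) / 2 < (x :: t).length := by
            simp only [List.length_cons]; omega
          rw [dif_pos hc, dif_pos hc']
          have : (i - start) / 2 = (i - (start + 2)) / 2 + 1 := by omega
          simp [this]
        · have hc' : ¬ (i ≥ start ∧ (i - start) % 2 = 0 ∧ (i - start) / 2 < (x :: t).length) := by
            simp only [List.length_cons]; omega
          rw [dif_neg hc, dif_neg hc']
          simp [List.getD_eq_getElem?_getD, List.getElem?_set_ne (Ne.symm hx)]

theorem alt_getD (s : List Int) (i : Nat) (hi : i < s.length) :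
    (setStride (setStride (List.replicate s.length (0:Int)) 0 (s.take ((s.length + 1) / 2))) 1
        ((s.drop ((s.length + 1) / 2)).reverse)).getD i 0 = pvTarget s i := by
  have hrl : (List.replicate s.length (0:Int)).length = s.length := by simp
  have hlen1 : (setStride (List.replicate s.length (0:Int)) 0
      (s.take ((s.length + 1) / 2))).length = s.length := by
    rw [setStride_length, hrl]
  have htk : (s.take ((s.length + 1) / 2)).length = min ((s.length + 1) / 2) s.length :=
    List.length_take
  have hdl : ((s.drop ((s.length + 1) / 2)).reverse).length
      = s.length - (s.length + 1) / 2 := by simp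
  rw [setStride_getElem _ _ 1 i (by omega)]
  rcases Nat.even_or_odd i with ⟨t, ht⟩ | ⟨t, ht⟩
  · have hno : ¬ (i ≥ 1 ∧ (i - 1) % 2 = 0 ∧
        (i - 1) / 2 < ((s.drop ((s.length + 1) / 2)).reverse).length) := by
      rw [hdl]; omega
    rw [dif_neg hno, setStride_getElem _ _ 0 i (by omega)]
    have hyes : i ≥ 0 ∧ (i - 0) % 2 = 0 ∧
        (i - 0) / 2 < (s.take ((s.length + 1) / 2)).length := by
      rw [htk]; omega
    rw [dif_pos hyes]
    have h1 : (i - 0) / 2 < (s.take ((s.length + 1) / 2)).length := hyes.2.2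
    have hidx : (i - 0) / 2 < s.length := by rw [htk] at h1; omega
    rw [List.getD_eq_getElem?_getD, List.getElem?_eq_getElem h1]
    unfold pvTarget
    rw [if_pos (by omega : i % 2 = 0)]
    rw [List.getD_eq_getElem?_getD, List.getElem?_eq_getElem (by omega : i / 2 < s.length)]
    simp only [Option.getD_some, List.getElem_take]
    congr 1
  · have hyes : i ≥ 1 ∧ (i - 1) % 2 = 0 ∧
        (i - 1) / 2 < ((s.drop ((s.length + 1) / 2)).reverse).length := by
      rw [hdl]; omega
    rw [dif_pos hyes]
    have h1 : (i - 1) / 2 < ((s.drop ((s.length + 1) / 2)).reverse).length := hyes.2.2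
    have hjlt : (i - 1) / 2 < s.length - (s.length + 1) / 2 := by rw [hdl] at h1; exact h1
    rw [List.getD_eq_getElem?_getD, List.getElem?_eq_getElem h1]
    unfold pvTarget
    rw [if_neg (by omega : ¬ i % 2 = 0)]
    rw [List.getD_eq_getElem?_getD,
      List.getElem?_eq_getElem (by omega : s.length - 1 - i / 2 < s.length)]
    simp only [Option.getD_some, List.getElem_reverse, List.getElem_drop]
    congr 1
    simp only [List.length_drop]
    omega

theorem alt_eq_map (s : List Int) :
    setStride (setStride (List.replicate s.length (0:Int)) 0 (s.take ((s.length + 1) / 2))) 1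
        ((s.drop ((s.length + 1) / 2)).reverse) =
      (List.range s.length).map (pvTarget s) := by
  have hlen : (setStride (setStride (List.replicate s.length (0:Int)) 0
      (s.take ((s.length + 1) / 2))) 1 ((s.drop ((s.length + 1) / 2)).reverse)).length
      = s.length := by simp [setStride_length]
  apply List.ext_getElem (by simp [hlen])
  intro i hi1 hi2
  have hi : i < s.length := by omega
  have := alt_getD s i hi
  rw [List.getD_eq_getElem?_getD, List.getElem?_eq_getElem hi1] at this
  simp only [Option.getD_some] at this
  simp [this, List.getElem_map, List.getElem_range]

-- ===== VERDICT (by name: the statement is the Claim_ definition above) =====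
theorem rearrangeArr_spec : Claim_equal_rearrangeArr := by
  intro arr _
  show rearrangeArr arr = rearrangeArr_alt arr
  unfold rearrangeArr rearrangeArr_alt
  simp only []
  rw [rearrangeArr_eq_map (PySem.List.sorted arr id), alt_eq_map (PySem.List.sorted arr id)]
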